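-- pv_equiv track=rewrite | github.com/LearnWithMaddy/Python-programs | cricket.py | function
-- ===== SOURCE A (Python) =====
-- def function(striker, Non_striker , scores , balls):
--     s = []
--     for i in scores:
--         if i!='w':
--             s.append(int(i))
--         else:
--             s.append(i)
--
--     for i in s:
--         if i==1 or i==3:
--             striker += i
--             temp = striker
--             striker = Non_striker
--             Non_striker = temp
--
--         if i==2 or i==4 or i==6:
--             striker += i
--
--         if i=="w":
--             striker = 0
--
--         balls += 1
--         if balls%6==0:
--             temp = striker
--             striker = Non_striker
--             Non_striker = temp
--
--     return striker , Non_striker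
-- ===== SOURCE B (Python) =====
-- def function(striker, Non_striker, scores, balls):
--     # Phase 1: deal each ball to batsman 0 or 1 by cumulative swap parity
--     # (a swap happens iff the run is 1/3 XOR the over ends; the striker's
--     # identity is just the XOR of all previous swap bits, independent of scores)
--     ev = ([], [])
--     p = 0
--     for k, i in enumerate(scores):
--         r = None if i == 'w' else int(i)
--         ev[p].append(r)
--         p ^= (r in (1, 3)) ^ ((balls + k + 1) % 6 == 0)
--     # Phase 2: a batsman's score is (his start, or 0 if he was ever dismissed)
--     # plus the scoring runs among his own deliveries after his last dismissal
--     def final(init, events):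
--         if None in events:
--             j = len(events) - 1 - events[::-1].index(None)
--             init, events = 0, events[j + 1:]
--         return init + sum(r for r in events if r in (1, 2, 3, 4, 6))
--     s0 = final(striker, ev[0])
--     s1 = final(Non_striker, ev[1])
--     return (s0, s1) if p == 0 else (s1, s0)
-- ===== Notes on version B (the rewrite author's own statement) =====
-- stated objective: alternative
-- what changed: B replaces A's stateful swap simulation by two independent phases: it first deals every ball to batsman 0 or 1 using the closed-form cumulative XOR of swap bits (run in {1,3} XOR over-boundary), which needs no score state, and then computes each batsman's score arithmetically as (initial value, or 0 if ever dismissed) plus the sum of scoring runs among his own deliveries after his last dismissal.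
import Mathlib
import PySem

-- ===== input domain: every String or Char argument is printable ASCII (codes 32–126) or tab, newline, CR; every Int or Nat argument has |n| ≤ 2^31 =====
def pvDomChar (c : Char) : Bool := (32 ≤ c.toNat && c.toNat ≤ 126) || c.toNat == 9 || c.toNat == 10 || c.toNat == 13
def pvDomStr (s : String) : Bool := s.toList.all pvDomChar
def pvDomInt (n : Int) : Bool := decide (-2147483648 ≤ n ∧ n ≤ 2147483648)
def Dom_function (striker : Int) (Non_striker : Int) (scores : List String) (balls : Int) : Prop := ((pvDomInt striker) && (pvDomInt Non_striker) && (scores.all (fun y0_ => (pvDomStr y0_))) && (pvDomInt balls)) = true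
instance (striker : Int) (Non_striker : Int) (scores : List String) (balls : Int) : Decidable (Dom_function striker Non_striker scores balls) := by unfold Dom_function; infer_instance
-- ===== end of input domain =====

-- B replaces A's swap simulation by parity-based dealing of the balls to the two batsmen
-- plus an independent arithmetic score (runs after the last dismissal) per batsman
-- ("alternative": same O(n) cost, different algorithm).

-- ===== PORT A =====
-- A's converted list element: int(i) for non-'w' (the .getD 0 is unreachable under Pre_), or 'w' encoded as none.
def pvConvA (i : String) : Option Int :=
  if i ≠ "w" then some ((PySem.Int.ofStr? i).getD 0) else none

-- step of A's second loop: state (striker, Non_striker, balls)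
def pvStepA (st : Int × Int × Int) (i : Option Int) : Int × Int × Int :=
  let (striker, Non_striker, balls) := st
  let (striker, Non_striker) :=
    if i = some 1 ∨ i = some 3 then (Non_striker, striker + i.getD 0)
    else (striker, Non_striker)
  let striker :=
    if i = some 2 ∨ i = some 4 ∨ i = some 6 then striker + i.getD 0 else striker
  let striker := if i = none then 0 else striker
  let balls := balls + 1
  let (striker, Non_striker) :=
    if PySem.Int.mod balls 6 = 0 then (Non_striker, striker) else (striker, Non_striker)
  (striker, Non_striker, balls)

def function (striker : Int) (Non_striker : Int) (scores : List String) (balls : Int) : Int × Int :=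
  (((scores.foldl (fun acc i => acc ++ [pvConvA i]) []).foldl pvStepA (striker, Non_striker, balls)).1,
   ((scores.foldl (fun acc i => acc ++ [pvConvA i]) []).foldl pvStepA (striker, Non_striker, balls)).2.1)

-- ===== PORT B =====
-- Source B's per-ball conversion: None for 'w', else int(i) (the .getD 0 is unreachable under Pre_)
def pvConvB (i : String) : Option Int :=
  if i = "w" then none else some ((PySem.Int.ofStr? i).getD 0)

-- phase 1 step: state (ev[0], ev[1], p); ki = (k, i) from enumerate(scores)
def pvStepDeal (balls : Int) (st : List (Option Int) × List (Option Int) × Nat) (ki : Int × String) :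
    List (Option Int) × List (Option Int) × Nat :=
  let (e0, e1, p) := st
  let r := pvConvB ki.2
  let (e0, e1) := if p = 0 then (e0 ++ [r], e1) else (e0, e1 ++ [r])
  let p := p ^^^ ((if r = some 1 ∨ r = some 3 then 1 else 0) ^^^
                  (if PySem.Int.mod (balls + ki.1 + 1) 6 = 0 then 1 else 0))
  (e0, e1, p)

-- sum(r for r in events if r in (1, 2, 3, 4, 6))
def pvSumCredits (events : List (Option Int)) : Int :=
  ((events.filter (fun r => r = some 1 ∨ r = some 2 ∨ r = some 3 ∨ r = some 4 ∨ r = some 6)).map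
    (fun r => r.getD 0)).sum

-- Source B's final(init, events); the .index(None).getD 0 is guarded by 'None in events'
def pvFinal (init : Int) (events : List (Option Int)) : Int :=
  if none ∈ events then
    let j : Int := (events.length : Int) - 1 - (((PySem.List.index? events.reverse none).getD 0 : Nat) : Int)
    0 + pvSumCredits (PySem.List.slice events (some (j + 1)) none)
  else init + pvSumCredits events

def function_alt (striker : Int) (Non_striker : Int) (scores : List String) (balls : Int) : Int × Int :=
  let d := (PySem.List.enumerate scores 0).foldl (pvStepDeal balls) ([], [], 0)
  let s0 := pvFinal striker d.1
  let s1 := pvFinal Non_striker d.2.1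
  if d.2.2 = 0 then (s0, s1) else (s1, s0)

-- ===== PRECONDITION & SPEC =====
-- Pre_ excludes exactly the inputs where Python's int(i) raises ValueError (an element
-- that is neither 'w' nor an int literal); both A and B raise there.
def Pre_function (striker : Int) (Non_striker : Int) (scores : List String) (balls : Int) : Prop :=
  ∀ i ∈ scores, i = "w" ∨ (PySem.Int.ofStr? i).isSome
instance (striker : Int) (Non_striker : Int) (scores : List String) (balls : Int) : Decidable (Pre_function striker Non_striker scores balls) := by unfold Pre_function; infer_instance
def pvWitness_function : Int × Int × List String × Int := (10, 5, ["1", "w", "4"], 2)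

def Spec_function (striker : Int) (Non_striker : Int) (scores : List String) (balls : Int) (out : Int × Int) : Prop := out = function_alt striker Non_striker scores balls
instance (striker : Int) (Non_striker : Int) (scores : List String) (balls : Int) (out : Int × Int) : Decidable (Spec_function striker Non_striker scores balls out) := by unfold Spec_function; infer_instance

-- ===== CLAIM (what is proved, stated in full; the proofs are below) =====
def Claim_equal_function : Prop := ∀ (striker : Int) (Non_striker : Int) (scores : List String) (balls : Int), Dom_function striker Non_striker scores balls → Pre_function striker Non_striker scores balls → Spec_function striker Non_striker scores balls (function striker Non_striker scores balls)

-- ===== LEMMAS AND PROOFS =====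

-- A's two converted notions agree
theorem convAB (i : String) : pvConvA i = pvConvB i := by
  simp only [pvConvA, pvConvB, ne_eq, ite_not]

-- A's first loop builds exactly the map of pvConvA
theorem convA_eq (scores : List String) (acc : List (Option Int)) :
    scores.foldl (fun acc i => acc ++ [pvConvA i]) acc = acc ++ scores.map pvConvA := by
  induction scores generalizing acc with
  | nil => simp [List.foldl]
  | cons h t ih => simp [List.foldl, ih]

-- intermediate simulation of A keyed by batsman IDENTITY: state (p0, p1, cur, balls)
def pvStepC (st : Int × Int × Nat × Int) (r : Option Int) : Int × Int × Nat × Int :=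
  let (p0, p1, cur, bv) := st
  let (p0, p1, cur) :=
    match r with
    | none => if cur = 0 then ((0 : Int), p1, cur) else (p0, (0 : Int), cur)
    | some x =>
      if x = 1 ∨ x = 3 then (if cur = 0 then (p0 + x, p1, 1) else (p0, p1 + x, 0))
      else if x = 2 ∨ x = 4 ∨ x = 6 then (if cur = 0 then (p0 + x, p1, cur) else (p0, p1 + x, cur))
      else (p0, p1, cur)
  let bv := bv + 1
  let cur := if PySem.Int.mod bv 6 = 0 then 1 - cur else cur
  (p0, p1, cur, bv)

-- view C-state as A's (striker, Non_striker, balls)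
def pvView (st : Int × Int × Nat × Int) : Int × Int × Int :=
  (if st.2.2.1 = 0 then st.1 else st.2.1, if st.2.2.1 = 0 then st.2.1 else st.1, st.2.2.2)

theorem stepC_cur (st : Int × Int × Nat × Int) (r : Option Int) (h : st.2.2.1 ≤ 1) :
    (pvStepC st r).2.2.1 ≤ 1 := by
  obtain ⟨p0, p1, cur, b⟩ := st
  simp only [pvStepC]
  cases r <;> split_ifs <;> simp_all <;> split_ifs <;> simp_all

set_option maxHeartbeats 2000000 in
theorem step_comm (st : Int × Int × Nat × Int) (r : Option Int) (h : st.2.2.1 ≤ 1) :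
    pvStepA (pvView st) r = pvView (pvStepC st r) := by
  obtain ⟨p0, p1, cur, b⟩ := st
  simp only at h
  cases r with
  | none =>
    interval_cases cur <;>
      simp only [pvStepA, pvStepC, pvView] <;> split_ifs <;> simp_all
  | some x =>
    interval_cases cur <;>
      simp only [pvStepA, pvStepC, pvView, Option.some.injEq, Option.getD_some,
        reduceCtorEq] <;>
      split_ifs <;> simp_all <;> omega

theorem loop_comm (rs : List (Option Int)) (st : Int × Int × Nat × Int) (h : st.2.2.1 ≤ 1) :
    rs.foldl pvStepA (pvView st) = pvView (rs.foldl pvStepC st) := by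
  induction rs generalizing st with
  | nil => rfl
  | cons r t ih =>
    simp only [List.foldl]
    rw [step_comm st r h]
    exact ih _ (stepC_cur st r h)

-- the swap bit of a ball: run in {1,3} XOR over-boundary
def pvBit (bv : Int) (r : Option Int) : Nat :=
  (if r = some 1 ∨ r = some 3 then 1 else 0) ^^^ (if PySem.Int.mod (bv + 1) 6 = 0 then 1 else 0)

-- spec of phase 1: deal the converted balls to the two identities
def pvDeal (p : Nat) (bv : Int) : List (Option Int) → List (Option Int) × List (Option Int) × Nat
  | [] => ([], [], p)
  | r :: rs =>
    let rest := pvDeal (p ^^^ pvBit bv r) (bv + 1) rs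
    (if p = 0 then r :: rest.1 else rest.1, if p = 0 then rest.2.1 else r :: rest.2.1, rest.2.2)

theorem deal_fold (balls : Int) (scores : List String) :
    ∀ (s : Int) (e0 e1 : List (Option Int)) (p : Nat),
    (PySem.List.enumerate scores s).foldl (pvStepDeal balls) (e0, e1, p) =
      (e0 ++ (pvDeal p (balls + s) (scores.map pvConvB)).1,
       e1 ++ (pvDeal p (balls + s) (scores.map pvConvB)).2.1,
       (pvDeal p (balls + s) (scores.map pvConvB)).2.2) := by
  induction scores with
  | nil => intro s e0 e1 p; simp [PySem.List.enumerate_nil, pvDeal]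
  | cons i t ih =>
    intro s e0 e1 p
    rw [PySem.List.enumerate_cons, List.foldl_cons]
    have hstep : pvStepDeal balls (e0, e1, p) (s, i) =
        (if p = 0 then e0 ++ [pvConvB i] else e0,
         if p = 0 then e1 else e1 ++ [pvConvB i],
         p ^^^ pvBit (balls + s) (pvConvB i)) := by
      by_cases hp : p = 0 <;> simp [pvStepDeal, pvBit, hp]
    rw [hstep, ih (s + 1)]
    have hbv : balls + (s + 1) = balls + s + 1 := by ring
    rw [List.map_cons]
    simp only [pvDeal, hbv]
    by_cases hp : p = 0 <;> simp [hp, List.append_assoc]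

-- the per-ball score update a single batsman's deliveries induce
def pvG (s : Int) (r : Option Int) : Int :=
  match r with
  | none => 0
  | some x => s + (if x = 1 ∨ x = 2 ∨ x = 3 ∨ x = 4 ∨ x = 6 then x else 0)

theorem sumCredits_cons (r : Option Int) (l : List (Option Int)) :
    pvSumCredits (r :: l) =
      (match r with
       | none => 0
       | some x => if x = 1 ∨ x = 2 ∨ x = 3 ∨ x = 4 ∨ x = 6 then x else 0) + pvSumCredits l := by
  cases r with
  | none => simp [pvSumCredits, List.filter]
  | some x =>
    by_cases h : x = 1 ∨ x = 2 ∨ x = 3 ∨ x = 4 ∨ x = 6 <;>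
      simp [pvSumCredits, h]

theorem foldl_g_not_mem (l : List (Option Int)) (h : none ∉ l) (init : Int) :
    l.foldl pvG init = init + pvSumCredits l := by
  induction l generalizing init with
  | nil => simp [pvSumCredits]
  | cons r t ih =>
    have hr : r ≠ none := fun hh => h (hh ▸ List.mem_cons_self ..)
    have ht : none ∉ t := fun hh => h (List.mem_cons_of_mem _ hh)
    cases r with
    | none => exact absurd rfl hr
    | some x =>
      rw [List.foldl_cons, ih ht, sumCredits_cons]
      simp [pvG]; ring

-- Source B's final IS the per-ball replay fold
theorem final_spec (init : Int) (l : List (Option Int)) :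
    pvFinal init l = l.foldl pvG init := by
  by_cases h : none ∈ l
  · -- decompose at the LAST occurrence of none
    have hrev : (none : Option Int) ∈ l.reverse := List.mem_reverse.mpr h
    obtain ⟨i, hi⟩ := Option.isSome_iff_exists.mp ((PySem.List.index?_isSome_iff l.reverse none).mpr hrev)
    obtain ⟨pre, suf, hdec, hlen, hpre⟩ := (PySem.List.index?_eq_some_iff l.reverse none i).mp hi
    have hl : l = suf.reverse ++ [none] ++ pre.reverse := by
      have := congrArg List.reverse hdec
      simpa using this
    have hlength : l.length = suf.length + 1 + i := by
      subst hlen; rw [hl]; simp; omega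
    have hj : (l.length : Int) - 1 - ((i : Nat) : Int) + 1 = ((suf.length + 1 : Nat) : Int) := by
      rw [hlength]; push_cast; ring
    rw [pvFinal, if_pos h, hi]
    simp only [Option.getD_some, hj]
    rw [PySem.List.slice_from_natCast]
    have hdrop : l.drop (suf.length + 1) = pre.reverse := by
      rw [hl]
      have : (suf.reverse ++ [none]).length = suf.length + 1 := by simp
      rw [← this, List.drop_left]
    rw [hdrop, hl]
    rw [List.foldl_append, List.foldl_append]
    simp only [List.foldl_cons, List.foldl_nil, pvG]
    rw [foldl_g_not_mem _ (by simpa using hpre)]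
  · rw [pvFinal, if_neg h, foldl_g_not_mem l h]

-- parity stays in {0,1}
theorem deal_cur_le (rs : List (Option Int)) : ∀ (p : Nat) (bv : Int), p ≤ 1 →
    (pvDeal p bv rs).2.2 ≤ 1 := by
  induction rs with
  | nil => intro p bv h; simpa [pvDeal] using h
  | cons r t ih =>
    intro p bv h
    simp only [pvDeal]
    exact ih _ _ (by unfold pvBit; interval_cases p <;> split_ifs <;> decide)

-- one C-step, expressed through pvG and pvBit
theorem stepC_route (s0 s1 : Int) (p : Nat) (bv : Int) (r : Option Int) (h : p ≤ 1) :
    pvStepC (s0, s1, p, bv) r =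
      (if p = 0 then pvG s0 r else s0, if p = 0 then s1 else pvG s1 r,
       p ^^^ pvBit bv r, bv + 1) := by
  cases r with
  | none =>
    interval_cases p <;> simp only [pvStepC, pvG, pvBit] <;> split_ifs <;> simp_all
  | some x =>
    interval_cases p <;>
      simp only [pvStepC, pvG, pvBit, Option.some.injEq, reduceCtorEq] <;>
      split_ifs <;> simp_all

-- A's identity-keyed simulation = B's deal + per-batsman replay
theorem route (rs : List (Option Int)) :
    ∀ (s0 s1 : Int) (p : Nat) (bv : Int), p ≤ 1 →
    rs.foldl pvStepC (s0, s1, p, bv) =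
      ((pvDeal p bv rs).1.foldl pvG s0, (pvDeal p bv rs).2.1.foldl pvG s1,
       (pvDeal p bv rs).2.2, bv + rs.length) := by
  induction rs with
  | nil => intro s0 s1 p bv h; simp [pvDeal]
  | cons r t ih =>
    intro s0 s1 p bv h
    rw [List.foldl_cons, stepC_route s0 s1 p bv r h]
    have hb : p ^^^ pvBit bv r ≤ 1 := by
      unfold pvBit; interval_cases p <;> split_ifs <;> decide
    rw [ih _ _ _ _ hb]
    simp only [pvDeal]
    by_cases hp : p = 0 <;> simp [hp, List.foldl_cons] <;> ring

-- ===== VERDICT (by name: the statement is the Claim_ definition above) =====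
theorem function_spec : Claim_equal_function := by
  intro striker Non_striker scores balls _ _
  show _ = _
  unfold function function_alt
  rw [convA_eq, List.nil_append,
    show ((striker, Non_striker, balls) : Int × Int × Int) = pvView (striker, Non_striker, 0, balls) from rfl,
    loop_comm (scores.map pvConvA) (striker, Non_striker, 0, balls) (by simp)]
  have hconv : scores.map pvConvA = scores.map pvConvB := List.map_congr_left fun i _ => convAB i
  rw [hconv, route (scores.map pvConvB) striker Non_striker 0 balls (by simp)]
  have hfold := deal_fold balls scores 0 [] [] 0
  rw [show balls + 0 = balls from by ring] at hfold
  rw [hfold]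
  simp only [List.nil_append, final_spec]
  rcases hle : pvDeal 0 balls (scores.map pvConvB) with ⟨d0, d1, pf⟩
  have hpf : pf ≤ 1 := by
    have := deal_cur_le (scores.map pvConvB) 0 balls (by simp)
    rw [hle] at this; exact this
  by_cases hp : pf = 0 <;> simp [pvView, hp]
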